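-- pv_equiv track=rewrite | github.com/andrewgalvin/DiscordProfileConverter | main2.py | sumOfDoubleEvenPlace
-- ===== SOURCE A (Python) =====
-- def sumOfDoubleEvenPlace(number):
--     flag = False
--     total = 0
--     while number > 0:
--         if flag:
--             total += getDigit(2 * (number % 10))
--         flag = not flag
--         number //= 10
--     return total
--
-- def getDigit(number):
--     if number < 10:
--         return number
--     else:
--         return getDigit((number // 10) + (number % 10))
-- ===== SOURCE B (Python) =====
-- def sumOfDoubleEvenPlace(number):
--     digits = []
--     while number > 0:
--         digits.append(number % 10)
--         number //= 10
--     return sum(getDigit(2 * d) for d in digits[1::2])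
--
-- def getDigit(number):
--     if number < 10:
--         return number
--     else:
--         return getDigit((number // 10) + (number % 10))
-- ===== Notes on version B (the rewrite author's own statement) =====
-- stated objective: simpler
-- what changed: Replaced A's interleaved flag-toggling while loop with two separate passes: first collect the digits least-significant-first, then sum getDigit(2*d) over every second digit (digits[1::2]); no flag state is kept.
import Mathlib
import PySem

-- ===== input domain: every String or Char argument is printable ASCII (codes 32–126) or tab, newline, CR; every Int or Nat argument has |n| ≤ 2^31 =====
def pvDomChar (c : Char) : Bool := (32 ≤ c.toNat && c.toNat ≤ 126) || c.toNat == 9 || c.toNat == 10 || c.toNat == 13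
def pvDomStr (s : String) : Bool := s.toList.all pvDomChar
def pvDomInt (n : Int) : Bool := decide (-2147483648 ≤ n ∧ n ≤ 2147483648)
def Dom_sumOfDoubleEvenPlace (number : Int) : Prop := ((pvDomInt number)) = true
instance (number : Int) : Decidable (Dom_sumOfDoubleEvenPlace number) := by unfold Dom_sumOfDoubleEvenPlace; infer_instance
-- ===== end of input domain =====

-- B replaces A's interleaved flag-toggling loop by two passes (collect digits, then sum over every second one); objective: simpler.

-- ===== PORT A =====
-- helper getDigit, shared verbatim by A and B in Python
def getDigit (number : Int) : Int :=
  if number < 10 then number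
  else getDigit (PySem.Int.floordiv number 10 + PySem.Int.mod number 10)
termination_by number.toNat
decreasing_by
  rw [PySem.Int.floordiv_eq_ediv_of_pos (by omega), PySem.Int.mod_eq_emod_of_pos (by omega)]
  omega

-- A's while loop: state (number, flag, total)
def loopA (number : Int) (flag : Bool) (total : Int) : Int :=
  if number > 0 then
    loopA (PySem.Int.floordiv number 10) (!flag)
      (if flag then total + getDigit (2 * PySem.Int.mod number 10) else total)
  else total
termination_by number.toNat
decreasing_by
  rw [PySem.Int.floordiv_eq_ediv_of_pos (by omega)]
  omega

def sumOfDoubleEvenPlace (number : Int) : Int := loopA number false 0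

-- ===== PORT B =====
-- B's first pass: the digits of number, least-significant first (the while loop in Source B)
def collectDigits (number : Int) : List Int :=
  if number > 0 then
    PySem.Int.mod number 10 :: collectDigits (PySem.Int.floordiv number 10)
  else []
termination_by number.toNat
decreasing_by
  rw [PySem.Int.floordiv_eq_ediv_of_pos (by omega)]
  omega

-- hand-written port of the step-2 slice xs[0::2] / xs[1::2] (PySem has no step slices); exact on lists
mutual
def evens : List Int → List Int
  | [] => []
  | x :: xs => x :: odds xs
def odds : List Int → List Int
  | [] => []
  | _ :: xs => evens xs
end

def sumOfDoubleEvenPlace_alt (number : Int) : Int :=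
  ((odds (collectDigits number)).map (fun d => getDigit (2 * d))).sum

-- ===== PRECONDITION & SPEC =====
def Spec_sumOfDoubleEvenPlace (number : Int) (out : Int) : Prop := out = sumOfDoubleEvenPlace_alt number
instance (number : Int) (out : Int) : Decidable (Spec_sumOfDoubleEvenPlace number out) := by unfold Spec_sumOfDoubleEvenPlace; infer_instance

-- ===== CLAIM (what is proved, stated in full; the proofs are below) =====
def Claim_equal_sumOfDoubleEvenPlace : Prop := ∀ (number : Int), Dom_sumOfDoubleEvenPlace number → Spec_sumOfDoubleEvenPlace number (sumOfDoubleEvenPlace number)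

-- ===== LEMMAS AND PROOFS =====

-- the loop with flag=true sums over the even-index digits, with flag=false over the odd-index ones
theorem loopA_eq (k : Nat) : ∀ (n : Int), n.toNat ≤ k → ∀ (t : Int),
    (loopA n true t = t + ((evens (collectDigits n)).map (fun d => getDigit (2 * d))).sum) ∧
    (loopA n false t = t + ((odds (collectDigits n)).map (fun d => getDigit (2 * d))).sum) := by
  induction k with
  | zero =>
    intro n hn t
    have hn0 : ¬ n > 0 := by omega
    constructor <;> (rw [loopA, collectDigits]; simp [hn0, evens, odds])
  | succ k ih =>
    intro n hn t
    by_cases hpos : n > 0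
    · have hm : (PySem.Int.floordiv n 10).toNat ≤ k := by
        rw [PySem.Int.floordiv_eq_ediv_of_pos (by omega)]
        omega
      constructor
      · rw [loopA, collectDigits]
        simp only [hpos, if_pos, Bool.not_true, evens, List.map_cons, List.sum_cons]
        rw [(ih _ hm _).2]
        ring
      · rw [loopA, collectDigits]
        simp only [hpos, if_pos, Bool.not_false, odds]
        exact (ih _ hm _).1
    · constructor <;> (rw [loopA, collectDigits]; simp [hpos, evens, odds])

-- ===== VERDICT (by name: the statement is the Claim_ definition above) =====
theorem sumOfDoubleEvenPlace_spec : Claim_equal_sumOfDoubleEvenPlace := by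
  intro n _
  show sumOfDoubleEvenPlace n = sumOfDoubleEvenPlace_alt n
  have h := (loopA_eq n.toNat n le_rfl 0).2
  simpa [sumOfDoubleEvenPlace, sumOfDoubleEvenPlace_alt] using h
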